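-- pv_equiv track=rewrite | github.com/DEdgamer1123/Subify | src/scripts/SRT_Automatico.py | dividir_bloque
-- ===== SOURCE A (Python) =====
-- def dividir_bloque(bloque, idx_corte, max_chars):
--     """
--     Divide bloque en idx_corte, respetando palabras completas.
--     idx_corte es la posición donde queremos cortar (después de coma/punto).
--     """
--     caracteres_acumulados = 0
--
--     for i, w in enumerate(bloque):
--         palabra = w['text'].strip()
--         palabra_con_espacio = ' ' + palabra if i > 0 else palabra
--
--         caracteres_acumulados += len(palabra_con_espacio)
--
--         if caracteres_acumulados > idx_corte:
--             parte1 = bloque[:i]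
--             parte2 = bloque[i:]
--
--             if not parte1:
--                 parte1 = [bloque[0]]
--                 parte2 = bloque[1:]
--
--             return parte1, parte2
--
--     return bloque, []
-- ===== SOURCE B (Python) =====
-- def dividir_bloque(bloque, idx_corte, max_chars):
--     # Stage 1: build the list of cumulative character totals (word lengths plus
--     # one joining space for every word after the first).
--     prefix = []
--     total = 0
--     for i, w in enumerate(bloque):
--         total += len(w['text'].strip()) + (1 if i > 0 else 0)
--         prefix.append(total)
--     # Stage 2: binary search the monotone prefix list for the first index whose
--     # total exceeds idx_corte (prefix is nondecreasing, so bisection is valid).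
--     lo, hi = 0, len(prefix)
--     while lo < hi:
--         mid = (lo + hi) // 2
--         if prefix[mid] <= idx_corte:
--             lo = mid + 1
--         else:
--             hi = mid
--     if lo == len(bloque):
--         return bloque, []
--     split = max(lo, 1)
--     return bloque[:split], bloque[split:]
-- ===== Notes on version B (the rewrite author's own statement) =====
-- stated objective: alternative
-- what changed: A fuses accumulation and the split test into one linear scan with an early return; B first builds the list of cumulative character totals and then finds the split index by BINARY SEARCH on that monotone list (bisection on lo/hi), slicing once at the end.
-- outside the precondition, e.g. on dividir_bloque([{'text': 'a'}, {}], 0, 3): A returns ([{'text': 'a'}], [{}]), B raises KeyError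
import Mathlib
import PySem

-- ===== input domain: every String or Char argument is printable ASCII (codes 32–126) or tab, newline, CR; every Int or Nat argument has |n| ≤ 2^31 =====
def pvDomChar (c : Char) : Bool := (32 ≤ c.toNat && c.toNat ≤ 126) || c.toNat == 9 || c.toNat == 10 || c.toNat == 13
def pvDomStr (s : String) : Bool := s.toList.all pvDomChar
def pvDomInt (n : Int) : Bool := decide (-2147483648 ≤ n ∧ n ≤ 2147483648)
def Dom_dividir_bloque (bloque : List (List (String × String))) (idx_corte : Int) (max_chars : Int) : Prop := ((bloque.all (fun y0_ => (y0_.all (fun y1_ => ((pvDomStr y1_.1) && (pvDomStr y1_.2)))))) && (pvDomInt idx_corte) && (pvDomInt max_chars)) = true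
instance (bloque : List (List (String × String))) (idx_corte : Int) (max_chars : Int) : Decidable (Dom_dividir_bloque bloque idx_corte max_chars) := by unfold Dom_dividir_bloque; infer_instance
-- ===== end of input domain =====

-- B replaces A's fused accumulate-and-split linear scan by a prefix-sum list plus a
-- BINARY SEARCH for the split index (objective: alternative decomposition/algorithm).


-- ===== PORT A =====
-- A's loop: enumerate the words, accumulate len of each stripped word
-- (plus 1 for the joining space when i > 0) and return the clamped split the
-- first time the running total exceeds idx_corte.
def dividirA_go (orig : List (List (String × String))) (idx_corte : Int) :
    List (Int × List (String × String)) → Int →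
    (List (List (String × String))) × (List (List (String × String)))
  | [], _ => (orig, [])
  | (i, w) :: rest, acc =>
    let palabra := PySem.Str.strip ((w.lookup "text").getD "")
    -- len(palabra_con_espacio) = len(palabra) + 1 iff i > 0
    let lenPcs : Int := (if i > 0 then 1 else 0) + PySem.Str.len palabra
    let acc2 := acc + lenPcs
    if acc2 > idx_corte then
      let parte1 := PySem.List.slice orig none (some i)
      let parte2 := PySem.List.slice orig (some i) none
      if parte1 = [] then
        -- parte1 = [bloque[0]]; orig is nonempty here, so the getD [] is never used
        (((PySem.List.pyGet? orig 0).map (fun h => [h])).getD [], PySem.List.slice orig (some 1) none)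
      else (parte1, parte2)
    else dividirA_go orig idx_corte rest acc2

def dividir_bloque (bloque : List (List (String × String))) (idx_corte : Int) (max_chars : Int) : (List (List (String × String))) × (List (List (String × String))) :=
  dividirA_go bloque idx_corte (PySem.List.enumerate bloque 0) 0

-- ===== PORT B =====
-- B stage 2: the while-loop binary search on the prefix list (lo,hi bisection);
-- mid is always < pr.length when entered, so getD's default is never used.
def pvBS (pr : List Int) (idx : Int) (lo hi : Nat) : Nat :=
  if _h : lo < hi then
    let mid := (lo + hi) / 2
    if pr.getD mid 0 ≤ idx then pvBS pr idx (mid + 1) hi else pvBS pr idx lo mid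
  else lo
termination_by hi - lo
decreasing_by all_goals omega

-- B: one pass building the prefix-sum list of cumulative totals, then binary
-- search for the first total exceeding idx_corte, clamp to 1, slice once.
def dividir_bloque_alt (bloque : List (List (String × String))) (idx_corte : Int) (max_chars : Int) : (List (List (String × String))) × (List (List (String × String))) :=
  let pr := ((PySem.List.enumerate bloque 0).foldl
      (fun (st : List Int × Int) iw =>
        let total := st.2 + PySem.Str.len (PySem.Str.strip ((iw.2.lookup "text").getD "")) +
          (if iw.1 > 0 then 1 else 0)
        (st.1 ++ [total], total)) ([], 0)).1
  let lo := pvBS pr idx_corte 0 pr.length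
  if lo = bloque.length then (bloque, [])
  else
    let s := max lo 1
    (bloque.take s, bloque.drop s)

-- ===== PRECONDITION & SPEC =====
-- Pre_ excludes blocks in which some word dict has no "text" key: Python A raises
-- KeyError on w['text'] unless its loop happens to split before reaching that word,
-- while B (which builds the whole prefix list) always raises KeyError there.
def Pre_dividir_bloque (bloque : List (List (String × String))) (idx_corte : Int) (max_chars : Int) : Prop :=
  ∀ w ∈ bloque, (w.lookup "text").isSome
instance (bloque : List (List (String × String))) (idx_corte : Int) (max_chars : Int) : Decidable (Pre_dividir_bloque bloque idx_corte max_chars) := by unfold Pre_dividir_bloque; infer_instance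

def pvWitness_dividir_bloque : (List (List (String × String))) × Int × Int :=
  ([[("text", "hola")], [("text", "mundo feliz")]], 5, 42)

def Spec_dividir_bloque (bloque : List (List (String × String))) (idx_corte : Int) (max_chars : Int) (out : (List (List (String × String))) × (List (List (String × String)))) : Prop := out = dividir_bloque_alt bloque idx_corte max_chars
instance (bloque : List (List (String × String))) (idx_corte : Int) (max_chars : Int) (out : (List (List (String × String))) × (List (List (String × String)))) : Decidable (Spec_dividir_bloque bloque idx_corte max_chars out) := by unfold Spec_dividir_bloque; infer_instance

-- ===== CLAIM (what is proved, stated in full; the proofs are below) =====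
def Claim_equal_dividir_bloque : Prop := ∀ (bloque : List (List (String × String))) (idx_corte : Int) (max_chars : Int), Dom_dividir_bloque bloque idx_corte max_chars → Pre_dividir_bloque bloque idx_corte max_chars → Spec_dividir_bloque bloque idx_corte max_chars (dividir_bloque bloque idx_corte max_chars)

-- ===== LEMMAS AND PROOFS =====

-- per-word character contribution, as both programs compute it
def pvContrib (iw : Int × List (String × String)) : Int :=
  (if iw.1 > 0 then 1 else 0) + PySem.Str.len (PySem.Str.strip ((iw.2.lookup "text").getD ""))

lemma pvContrib_nonneg (iw : Int × List (String × String)) : 0 ≤ pvContrib iw := by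
  unfold pvContrib
  have h : (0:Int) ≤ PySem.Str.len (PySem.Str.strip ((iw.2.lookup "text").getD "")) := by
    simp [PySem.Str.len_eq]
  split <;> omega

-- prefix sums of pvContrib starting from t
def pvPref : List (Int × List (String × String)) → Int → List Int
  | [], _ => []
  | x :: xs, t => (t + pvContrib x) :: pvPref xs (t + pvContrib x)

lemma pvPref_length (l : List (Int × List (String × String))) (t : Int) :
    (pvPref l t).length = l.length := by
  induction l generalizing t with
  | nil => rfl
  | cons x xs ih => simp [pvPref, ih]

-- B's foldl builds exactly p0 ++ pvPref l t0 (the final total is irrelevant below)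
lemma foldl_pref (l : List (Int × List (String × String))) (p0 : List Int) (t0 : Int) :
    (l.foldl
      (fun (st : List Int × Int) iw =>
        let total := st.2 + PySem.Str.len (PySem.Str.strip ((iw.2.lookup "text").getD "")) +
          (if iw.1 > 0 then 1 else 0)
        (st.1 ++ [total], total)) (p0, t0)).1 = p0 ++ pvPref l t0 := by
  induction l generalizing p0 t0 with
  | nil => simp [pvPref]
  | cons x xs ih =>
    simp only [List.foldl_cons]
    have he : t0 + PySem.Str.len (PySem.Str.strip ((x.2.lookup "text").getD "")) +
        (if x.1 > 0 then 1 else 0) = t0 + pvContrib x := by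
      unfold pvContrib; ring
    simp only [he, ih, pvPref, List.append_assoc, List.singleton_append]

-- closed form of a prefix-sum entry
lemma pvPref_getElem (l : List (Int × List (String × String))) (t : Int) (j : Nat)
    (hj : j < l.length) :
    (pvPref l t)[j]'(by rw [pvPref_length]; exact hj) =
      t + ((l.take (j+1)).map pvContrib).sum := by
  induction l generalizing t j with
  | nil => simp at hj
  | cons x xs ih =>
    cases j with
    | zero => simp [pvPref]
    | succ j =>
      have hj' : j < xs.length := by simpa using hj
      have := ih (t + pvContrib x) j hj'
      simp only [pvPref, List.getElem_cons_succ, this, List.take_succ_cons, List.map_cons,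
        List.sum_cons]
      ring

-- prefix sums are nondecreasing
lemma pvPref_mono (l : List (Int × List (String × String))) (t : Int) (i j : Nat)
    (hij : i ≤ j) (hj : j < l.length) :
    (pvPref l t)[i]'(by rw [pvPref_length]; omega) ≤
      (pvPref l t)[j]'(by rw [pvPref_length]; exact hj) := by
  rw [pvPref_getElem l t i (by omega), pvPref_getElem l t j hj]
  have hsplit : (l.map pvContrib).take (j+1) =
      (l.map pvContrib).take (i+1) ++ (((l.map pvContrib).drop (i+1)).take (j-i)) := by
    rw [← List.take_add]
    congr 1; omega
  have h0 : (0:Int) ≤ ((((l.map pvContrib).drop (i+1)).take (j-i))).sum := by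
    apply List.sum_nonneg
    intro x hx
    have hx' : x ∈ l.map pvContrib := List.mem_of_mem_drop (List.mem_of_mem_take hx)
    obtain ⟨y, _, rfl⟩ := List.mem_map.mp hx'
    exact pvContrib_nonneg y
  rw [List.map_take, List.map_take, hsplit, List.sum_append]
  omega

-- the count of prefix totals ≤ idx equals the first index whose total exceeds idx
lemma pvCount_eq (pr : List Int) (idx : Int) (k : Nat) (hk : k ≤ pr.length)
    (h1 : ∀ j (_ : j < k), pr[j]'(by omega) ≤ idx)
    (h2 : ∀ j (hj : j < pr.length), k ≤ j → idx < pr[j]'hj) :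
    pr.countP (fun t => decide (t ≤ idx)) = k := by
  conv_lhs => rw [← List.take_append_drop k pr]
  rw [List.countP_append]
  have hta : (pr.take k).countP (fun t => decide (t ≤ idx)) = (pr.take k).length := by
    apply List.countP_eq_length.mpr
    intro a ha
    obtain ⟨m, hm, rfl⟩ := List.getElem_of_mem ha
    have hm' : m < k := by simp [List.length_take] at hm; omega
    rw [List.getElem_take]
    simpa using h1 m hm'
  have hdr : (pr.drop k).countP (fun t => decide (t ≤ idx)) = 0 := by
    apply List.countP_eq_zero.mpr
    intro a ha
    obtain ⟨m, hm, rfl⟩ := List.getElem_of_mem ha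
    rw [List.getElem_drop]
    have hkm : k + m < pr.length := by simp [List.length_drop] at hm; omega
    have := h2 (k + m) hkm (by omega)
    simpa using this
  rw [hta, hdr, List.length_take]
  omega

-- B's binary search on a nondecreasing list computes the same split index:
-- the number of prefix totals ≤ idx
lemma pvBS_count (pr : List Int) (idx : Int)
    (hmono : ∀ i j (_ : i ≤ j) (hj : j < pr.length), pr[i]'(by omega) ≤ pr[j]'hj) :
    ∀ n lo hi, hi - lo ≤ n → ∀ (hlh : lo ≤ hi) (hhi : hi ≤ pr.length),
      (∀ j (hj : j < lo), pr[j]'(by omega) ≤ idx) →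
      (∀ j (hj : j < pr.length), hi ≤ j → idx < pr[j]'hj) →
      pvBS pr idx lo hi = pr.countP (fun t => decide (t ≤ idx)) := by
  intro n
  induction n with
  | zero =>
    intro lo hi hn hle hhi h1 h2
    have : lo = hi := by omega
    subst this
    rw [pvBS, dif_neg (by omega)]
    exact (pvCount_eq pr idx lo hhi h1 (fun j hj hge => h2 j hj hge)).symm
  | succ n ih =>
    intro lo hi hn hle hhi h1 h2
    rw [pvBS]
    by_cases hlt : lo < hi
    · rw [dif_pos hlt]
      have hmidlt : (lo + hi) / 2 < pr.length := by omega
      have hgd : pr.getD ((lo + hi) / 2) 0 = pr[(lo + hi) / 2]'hmidlt := by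
        simp [List.getD_eq_getElem?_getD, List.getElem?_eq_getElem hmidlt]
      show (if pr.getD ((lo + hi) / 2) 0 ≤ idx then pvBS pr idx ((lo + hi) / 2 + 1) hi
        else pvBS pr idx lo ((lo + hi) / 2)) = _
      rw [hgd]
      by_cases hc : pr[(lo + hi) / 2]'hmidlt ≤ idx
      · rw [if_pos hc]
        apply ih ((lo + hi) / 2 + 1) hi (by omega) (by omega) hhi _ h2
        intro j hj
        exact le_trans (hmono j ((lo + hi) / 2) (by omega) hmidlt) hc
      · rw [if_neg hc]
        apply ih lo ((lo + hi) / 2) (by omega) (by omega) (by omega) h1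
        intro j hj hge
        exact lt_of_lt_of_le (by omega) (hmono ((lo + hi) / 2) j hge hj)
    · rw [dif_neg hlt]
      have : lo = hi := by omega
      subst this
      exact (pvCount_eq pr idx lo hhi h1 (fun j hj hge => h2 j hj hge)).symm

-- entries of enumerate
lemma pvEnum_getElem? {α : Type} (xs : List α) (s : Int) (j : Nat) :
    (PySem.List.enumerate xs s)[j]? = xs[j]?.map (fun a => (s + (j:Int), a)) := by
  induction xs generalizing s j with
  | nil => simp [PySem.List.enumerate]
  | cons x xs ih =>
    rw [PySem.List.enumerate_cons]
    cases j with
    | zero => simp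
    | succ j =>
      rw [List.getElem?_cons_succ, List.getElem?_cons_succ, ih (s+1) j]
      cases xs[j]? <;> simp
      ring

lemma pvEnum_getElem {α : Type} (xs : List α) (s : Int) (j : Nat) (hj : j < xs.length) :
    (PySem.List.enumerate xs s)[j]'(by rw [PySem.List.length_enumerate]; exact hj) =
      (s + j, xs[j]) := by
  have h := pvEnum_getElem? xs s j
  rw [List.getElem?_eq_getElem hj,
    List.getElem?_eq_getElem (by rw [PySem.List.length_enumerate]; exact hj)] at h
  simpa using h

-- a normal form both ports are reduced to (count formulation of the split index)
def pvSplitNF (bloque : List (List (String × String))) (idx_corte : Int) :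
    (List (List (String × String))) × (List (List (String × String))) :=
  if (pvPref (PySem.List.enumerate bloque 0) 0).countP (fun t => decide (t ≤ idx_corte)) = bloque.length
  then (bloque, [])
  else (bloque.take (max ((pvPref (PySem.List.enumerate bloque 0) 0).countP (fun t => decide (t ≤ idx_corte))) 1),
        bloque.drop (max ((pvPref (PySem.List.enumerate bloque 0) 0).countP (fun t => decide (t ≤ idx_corte))) 1))

lemma alt_eq_NF (bloque : List (List (String × String))) (idx_corte max_chars : Int) :
    dividir_bloque_alt bloque idx_corte max_chars = pvSplitNF bloque idx_corte := by
  unfold dividir_bloque_alt pvSplitNF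
  rw [show (((PySem.List.enumerate bloque 0).foldl
      (fun (st : List Int × Int) iw =>
        let total := st.2 + PySem.Str.len (PySem.Str.strip ((iw.2.lookup "text").getD "")) +
          (if iw.1 > 0 then 1 else 0)
        (st.1 ++ [total], total)) ([], 0)).1) = [] ++ pvPref (PySem.List.enumerate bloque 0) 0
    from foldl_pref _ [] 0]
  simp only [List.nil_append]
  rw [pvBS_count (pvPref (PySem.List.enumerate bloque 0) 0) idx_corte
    (fun i j hij hj => pvPref_mono _ _ i j hij (by rw [← pvPref_length _ (0:Int)]; exact hj))
    (pvPref (PySem.List.enumerate bloque 0) 0).length 0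
    (pvPref (PySem.List.enumerate bloque 0) 0).length (by omega) (by omega) (by omega)
    (by intro j hj; omega) (by intro j hj hge; omega)]

-- the main loop invariant: from step k on (with the running total of the first k
-- contributions, none of which exceeded idx), A's loop computes pvSplitNF
lemma go_main (orig : List (List (String × String))) (idx : Int) :
    ∀ (l : List (Int × List (String × String))) (k : Nat),
      ∀ (_ : l = (PySem.List.enumerate orig 0).drop k) (hk : k ≤ orig.length),
      (∀ j (hj : j < k),
        (pvPref (PySem.List.enumerate orig 0) 0)[j]'(by
          rw [pvPref_length, PySem.List.length_enumerate]; omega) ≤ idx) →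
      dividirA_go orig idx l
          ((((PySem.List.enumerate orig 0).take k).map pvContrib).sum) =
        pvSplitNF orig idx := by
  intro l
  induction l with
  | nil =>
    intro k hl hk h1
    have hlen : (PySem.List.enumerate orig 0).length = orig.length :=
      PySem.List.length_enumerate _ _
    have hkn : k = orig.length := by
      by_contra hne
      have hklt : k < (PySem.List.enumerate orig 0).length := by omega
      have := List.drop_eq_getElem_cons hklt
      rw [this] at hl
      exact (List.cons_ne_nil _ _) hl.symm
    -- every prefix total ≤ idx, so the count is the full length and A falls through
    simp only [dividirA_go, pvSplitNF]
    have hcnt : (pvPref (PySem.List.enumerate orig 0) 0).countP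
        (fun t => decide (t ≤ idx)) = orig.length := by
      apply pvCount_eq _ _ _ (by rw [pvPref_length, hlen])
      · intro j hj
        exact h1 j (by omega)
      · intro j hj hge
        exfalso
        rw [pvPref_length, hlen] at hj
        omega
    rw [hcnt]
    simp
  | cons x t ih =>
    intro k hl hk h1
    have hlen : (PySem.List.enumerate orig 0).length = orig.length :=
      PySem.List.length_enumerate _ _
    have hklt : k < orig.length := by
      by_contra hge
      have : k = orig.length := by omega
      subst this
      rw [List.drop_eq_nil_of_le (by omega)] at hl
      exact (List.cons_ne_nil _ _) hl
    have hklt' : k < (PySem.List.enumerate orig 0).length := by omega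
    rw [List.drop_eq_getElem_cons hklt'] at hl
    have hx : x = ((k : Int), orig[k]) := by
      have := pvEnum_getElem orig 0 k hklt
      rw [List.cons.injEq] at hl
      rw [hl.1, this]
      simp
    have ht : t = (PySem.List.enumerate orig 0).drop (k+1) := by
      rw [List.cons.injEq] at hl; exact hl.2
    -- the new running total is the (k+1)-st prefix sum = pr[k]
    have hsum : (((PySem.List.enumerate orig 0).take k).map pvContrib).sum + pvContrib x =
        (pvPref (PySem.List.enumerate orig 0) 0)[k]'(by rw [pvPref_length]; exact hklt') := by
      rw [pvPref_getElem _ _ k hklt', hx]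
      rw [List.map_take, List.map_take]
      rw [List.sum_take_succ _ k (by rw [List.length_map]; exact hklt')]
      simp only [List.getElem_map, pvEnum_getElem orig 0 k hklt]
      simp
    subst hx
    simp only [dividirA_go]
    have hcsame : (if (k:Int) > 0 then (1:Int) else 0) +
        PySem.Str.len (PySem.Str.strip (((orig[k]).lookup "text").getD "")) =
        pvContrib ((k:Int), orig[k]) := rfl
    by_cases htrig :
        (((PySem.List.enumerate orig 0).take k).map pvContrib).sum +
          ((if (k:Int) > 0 then (1:Int) else 0) +
            PySem.Str.len (PySem.Str.strip (((orig[k]).lookup "text").getD ""))) > idx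
    · rw [if_pos htrig]
      rw [hcsame, hsum] at htrig
      -- the count is exactly k
      have hcnt : (pvPref (PySem.List.enumerate orig 0) 0).countP
          (fun t => decide (t ≤ idx)) = k := by
        apply pvCount_eq _ _ _ (by rw [pvPref_length, hlen]; omega)
        · intro j hj
          exact h1 j hj
        · intro j hj hge
          rw [pvPref_length, hlen] at hj
          calc idx < _ := htrig
            _ ≤ _ := pvPref_mono _ _ k j hge (by rw [hlen]; omega)
      rw [PySem.List.slice_to_natCast orig k, PySem.List.slice_from_natCast orig k]
      unfold pvSplitNF
      rw [hcnt]
      have hne : orig ≠ [] := by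
        intro h; rw [h] at hklt; simp at hklt
      by_cases hk0 : k = 0
      · subst hk0
        rw [if_pos List.take_zero, if_neg (by omega)]
        obtain ⟨a, as, rfl⟩ := List.exists_cons_of_ne_nil hne
        have hs1 : PySem.List.slice (a :: as) (some 1) none = (a :: as).drop 1 := by
          have h := PySem.List.slice_from_natCast (a :: as) 1
          simpa using h
        rw [hs1]
        simp [PySem.List.pyGet?, PySem.List.pyIdx?]
      · rw [if_neg (show ¬ List.take k orig = [] by
            rw [List.take_eq_nil_iff]
            rintro (h | h)
            exacts [hk0 h, hne h]),
          if_neg (by omega)]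
        congr 1 <;> · congr 1; omega
    · rw [if_neg htrig]
      rw [hcsame, hsum] at htrig
      have hstep : (((PySem.List.enumerate orig 0).take k).map pvContrib).sum +
          ((if (k:Int) > 0 then (1:Int) else 0) +
            PySem.Str.len (PySem.Str.strip (((orig[k]).lookup "text").getD ""))) =
          (((PySem.List.enumerate orig 0).take (k+1)).map pvContrib).sum := by
        rw [hcsame]
        rw [List.map_take, List.map_take]
        rw [List.sum_take_succ _ k (by rw [List.length_map]; exact hklt')]
        simp only [List.getElem_map, pvEnum_getElem orig 0 k hklt]
        simp
      rw [hstep]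
      apply ih (k+1) ht (by omega)
      intro j hj
      rcases Nat.lt_or_ge j k with hjk | hjk
      · exact h1 j hjk
      · have hjeq : j = k := by omega
        subst hjeq
        omega

-- ===== VERDICT (by name: the statement is the Claim_ definition above) =====
theorem dividir_bloque_spec : Claim_equal_dividir_bloque := by
  intro bloque idx_corte max_chars _ _
  show dividir_bloque bloque idx_corte max_chars = dividir_bloque_alt bloque idx_corte max_chars
  rw [alt_eq_NF]
  unfold dividir_bloque
  have := go_main bloque idx_corte (PySem.List.enumerate bloque 0) 0 (by simp)
    (by omega) (by intro j hj; omega)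
  simpa using this
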